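-- pv_equiv track=rewrite | github.com/Thejshri-A/Python-1000 | 562. Cold Spell.py | cold_spell
-- ===== SOURCE A (Python) =====
-- def cold_spell(temps, threshold):
--
--     periods=[]
--     start=None
--     for i, val in enumerate(temps):
--         if val<threshold:
--             if start is None:
--                 start=i+1
--         else:
--             if start is not None:
--                 periods.append([start, i])
--                 start=None
--     if start is not None:
--         periods.append([start, len(temps)])
--
--     return periods
-- ===== SOURCE B (Python) =====
-- def cold_spell(temps, threshold):
--     idxs = [i for i, v in enumerate(temps) if v < threshold]
--
--     def runs(lst):
--         if not lst:
--             return []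
--         f = lst[0]
--         l = lst[0]
--         rest = lst[1:]
--         while rest and rest[0] == l + 1:
--             l = rest[0]
--             rest = rest[1:]
--         return [[f + 1, l + 1]] + runs(rest)
--
--     return runs(idxs)
-- ===== Notes on version B (the rewrite author's own statement) =====
-- stated objective: alternative
-- what changed: Replaces A's running start/None state machine over the temperatures with a two-phase structure: first collect the below-threshold indices, then split that index list into maximal consecutive runs and emit [first+1, last+1] per run.
import Mathlib
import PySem

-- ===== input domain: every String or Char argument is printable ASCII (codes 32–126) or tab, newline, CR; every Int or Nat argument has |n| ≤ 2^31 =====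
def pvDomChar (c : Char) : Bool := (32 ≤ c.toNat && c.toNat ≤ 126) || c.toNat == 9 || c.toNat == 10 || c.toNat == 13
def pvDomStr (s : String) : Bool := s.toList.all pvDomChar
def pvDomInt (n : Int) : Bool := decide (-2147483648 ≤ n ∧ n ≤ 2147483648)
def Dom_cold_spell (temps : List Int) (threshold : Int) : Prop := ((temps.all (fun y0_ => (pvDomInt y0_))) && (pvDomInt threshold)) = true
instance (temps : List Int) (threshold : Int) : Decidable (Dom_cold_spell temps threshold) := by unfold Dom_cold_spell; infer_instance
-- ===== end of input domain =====

-- B replaces A's running start/None state machine with a two-phase collect-indices-then-group-runs structure (alternative decomposition, same cost).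

-- ===== PORT A =====
-- A's for-loop over enumerate(temps) carrying (periods, start); i is the running 0-based index.
-- The [] case performs the trailing `if start is not None: periods.append([start, len(temps)])`,
-- since there the running index i equals len(temps).
def coldGoA (threshold : Int) : List Int → Nat → Option Int → List (List Int) → List (List Int)
  | [], i, start, periods =>
      match start with
      | some s => periods ++ [[s, (i : Int)]]
      | none => periods
  | v :: rest, i, start, periods =>
      if v < threshold then
        match start with
        | none => coldGoA threshold rest (i + 1) (some ((i : Int) + 1)) periods
        | some _ => coldGoA threshold rest (i + 1) start periods
      else
        match start with
        | some s => coldGoA threshold rest (i + 1) none (periods ++ [[s, (i : Int)]])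
        | none => coldGoA threshold rest (i + 1) none periods

def cold_spell (temps : List Int) (threshold : Int) : List (List Int) :=
  coldGoA threshold temps 0 none []

-- ===== PORT B =====
-- `[i for i, v in enumerate(temps) if v < threshold]`
def belowIdx (threshold : Int) : List Int → Nat → List Nat
  | [], _ => []
  | v :: rest, i =>
      if v < threshold then i :: belowIdx threshold rest (i + 1)
      else belowIdx threshold rest (i + 1)

-- the inner while loop of `runs`: extend run (f, l) while the next index is l+1
def runsGo (f l : Nat) : List Nat → List (List Int)
  | [] => [[(f : Int) + 1, (l : Int) + 1]]
  | j :: rest =>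
      if j = l + 1 then runsGo f j rest
      else [(f : Int) + 1, (l : Int) + 1] :: runsB (j :: rest)
-- `runs`: split the index list into maximal consecutive runs
where runsB : List Nat → List (List Int)
  | [] => []
  | j :: rest => runsGo j j rest

def cold_spell_alt (temps : List Int) (threshold : Int) : List (List Int) :=
  runsGo.runsB (belowIdx threshold temps 0)

-- ===== PRECONDITION & SPEC =====
def Spec_cold_spell (temps : List Int) (threshold : Int) (out : List (List Int)) : Prop := out = cold_spell_alt temps threshold
instance (temps : List Int) (threshold : Int) (out : List (List Int)) : Decidable (Spec_cold_spell temps threshold out) := by unfold Spec_cold_spell; infer_instance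

-- ===== CLAIM (what is proved, stated in full; the proofs are below) =====
def Claim_equal_cold_spell : Prop := ∀ (temps : List Int) (threshold : Int), Dom_cold_spell temps threshold → Spec_cold_spell temps threshold (cold_spell temps threshold)

-- ===== LEMMAS AND PROOFS =====

theorem belowIdx_ge (threshold : Int) (rest : List Int) (i : Nat) :
    ∀ x ∈ belowIdx threshold rest i, i ≤ x := by
  induction rest generalizing i with
  | nil => simp [belowIdx]
  | cons v rest ih =>
    intro x hx
    simp only [belowIdx] at hx
    by_cases hv : v < threshold
    · rw [if_pos hv] at hx
      rcases List.mem_cons.mp hx with h | h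
      · omega
      · have := ih (i + 1) x h; omega
    · rw [if_neg hv] at hx
      have := ih (i + 1) x hx; omega

-- joint invariant for A's loop: with start = none it produces the grouped runs of the
-- remaining below-threshold indices; with start = some (f+1) and running index l+1 it is
-- mid-run, matching runsGo f l.
theorem coldGoA_inv (threshold : Int) (rest : List Int) :
    (∀ (i : Nat) (periods : List (List Int)),
        coldGoA threshold rest i none periods
          = periods ++ runsGo.runsB (belowIdx threshold rest i)) ∧
    (∀ (f l : Nat) (periods : List (List Int)),
        coldGoA threshold rest (l + 1) (some ((f : Int) + 1)) periods
          = periods ++ runsGo f l (belowIdx threshold rest (l + 1))) := by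
  induction rest with
  | nil => simp [coldGoA, belowIdx, runsGo, runsGo.runsB]
  | cons v rest ih =>
    obtain ⟨ih1, ih2⟩ := ih
    constructor
    · intro i periods
      by_cases h : v < threshold
      · simp only [coldGoA, belowIdx, if_pos h, runsGo.runsB]
        exact ih2 i i periods
      · simp only [coldGoA, belowIdx, if_neg h]
        exact ih1 (i + 1) periods
    · intro f l periods
      by_cases h : v < threshold
      · simp only [coldGoA, belowIdx, if_pos h, runsGo, if_true]
        exact ih2 f (l + 1) periods
      · simp only [coldGoA, belowIdx, if_neg h]
        rw [show ((l + 1 : Nat) : Int) = (l : Int) + 1 by push_cast; ring,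
          ih1 (l + 1 + 1) (periods ++ [[(f : Int) + 1, (l : Int) + 1]])]
        cases hb : belowIdx threshold rest (l + 1 + 1) with
        | nil => simp [runsGo, runsGo.runsB]
        | cons j rest' =>
          have hj : l + 1 + 1 ≤ j := belowIdx_ge threshold rest (l + 1 + 1) j (by rw [hb]; simp)
          simp only [runsGo, runsGo.runsB]
          rw [if_neg (by omega)]
          simp

-- ===== VERDICT (by name: the statement is the Claim_ definition above) =====
theorem cold_spell_spec : Claim_equal_cold_spell := by
  intro temps threshold _
  unfold Spec_cold_spell cold_spell cold_spell_alt
  simpa using (coldGoA_inv threshold temps).1 0 []
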